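-- pv_equiv track=rewrite | github.com/Bensie22/Clan-Auswertung | Master_Auswertung_GitHub.py | is_beginner_friendly_deck
-- ===== SOURCE A (Python) =====
-- def is_beginner_friendly_deck(cards: list) -> bool:
--     card_names = {c.get("name", "") for c in cards}
--     tricky_cards = {
--         "X-Bow", "Mortar", "Goblin Barrel", "Skeleton Barrel", "Miner", "Graveyard",
--         "Wall Breakers", "Goblin Drill", "Clone", "Mirror", "Freeze", "Tornado"
--     }
--     if card_names.intersection(tricky_cards):
--         return False
--
--     archetype = get_deck_archetype(cards)
--     return archetype in {"🛡️ Schwerer Angriff (Beatdown)", "⚡ Schneller Angriff (Rush/Spam)", "⚔️ Hybrid / Allrounder"}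
--
-- def get_deck_archetype(cards: list) -> str:
--     card_names = [c.get("name", "") for c in cards]
--     if any(n in card_names for n in ["Golem", "Lava Hound", "Giant", "Goblin Giant", "Electro Giant", "Elixir Golem"]):
--         return "🛡️ Schwerer Angriff (Beatdown)"
--     if any(n in card_names for n in ["X-Bow", "Mortar"]):
--         return "🏹 Belagerung (Siege)"
--     if any(n in card_names for n in ["Goblin Barrel", "Skeleton Barrel", "Miner", "Graveyard", "Wall Breakers", "Goblin Drill"]):
--         return "🗡️ Nadelstiche (Bait/Control)"
--     if any(n in card_names for n in ["Hog Rider", "Royal Hogs", "Battle Ram", "Ram Rider", "Balloon"]):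
--         return "⚡ Schneller Angriff (Rush/Spam)"
--     return "⚔️ Hybrid / Allrounder"
-- ===== SOURCE B (Python) =====
-- def is_beginner_friendly_deck(cards: list) -> bool:
--     # tricky_cards already contains every card that triggers the non-accepted
--     # archetypes (Siege: X-Bow/Mortar; Bait: Goblin Barrel/Skeleton Barrel/Miner/
--     # Graveyard/Wall Breakers/Goblin Drill), so a deck with no tricky card is
--     # always classified Beatdown/Rush/Hybrid — all accepted.  One pass suffices.
--     tricky_cards = {
--         "X-Bow", "Mortar", "Goblin Barrel", "Skeleton Barrel", "Miner", "Graveyard",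
--         "Wall Breakers", "Goblin Drill", "Clone", "Mirror", "Freeze", "Tornado"
--     }
--     return all(c.get("name", "") not in tricky_cards for c in cards)
-- ===== Notes on version B (the rewrite author's own statement) =====
-- stated objective: simpler
-- what changed: Dropped the get_deck_archetype helper entirely: since tricky_cards covers every card that triggers the two non-accepted archetypes (Siege and Bait), B is a single all() pass testing that no card name is tricky.
import Mathlib
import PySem

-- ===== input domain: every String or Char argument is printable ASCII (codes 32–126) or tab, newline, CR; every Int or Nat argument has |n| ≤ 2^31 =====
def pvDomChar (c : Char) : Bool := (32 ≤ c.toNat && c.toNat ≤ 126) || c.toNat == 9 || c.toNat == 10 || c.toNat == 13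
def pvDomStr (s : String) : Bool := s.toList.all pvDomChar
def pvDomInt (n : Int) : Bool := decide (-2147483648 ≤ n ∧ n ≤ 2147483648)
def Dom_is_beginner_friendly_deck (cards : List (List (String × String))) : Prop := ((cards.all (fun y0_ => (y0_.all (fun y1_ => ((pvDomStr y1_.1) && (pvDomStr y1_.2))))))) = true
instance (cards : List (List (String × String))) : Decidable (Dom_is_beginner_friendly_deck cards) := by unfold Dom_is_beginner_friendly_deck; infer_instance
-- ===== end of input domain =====

-- B replaces the multi-branch archetype classification by a single membership pass over the deck
-- (tricky_cards covers every card that leads to a non-accepted archetype); objective: simpler.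

-- ===== PORT A =====
def get_deck_archetype (cards : List (List (String × String))) : String :=
  let card_names := cards.map (fun c => (PySem.Dict.mk c).getD "name" "")
  if ["Golem", "Lava Hound", "Giant", "Goblin Giant", "Electro Giant", "Elixir Golem"].any
      (fun n => card_names.contains n) then "🛡️ Schwerer Angriff (Beatdown)"
  else if ["X-Bow", "Mortar"].any (fun n => card_names.contains n) then "🏹 Belagerung (Siege)"
  else if ["Goblin Barrel", "Skeleton Barrel", "Miner", "Graveyard", "Wall Breakers", "Goblin Drill"].any
      (fun n => card_names.contains n) then "🗡️ Nadelstiche (Bait/Control)"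
  else if ["Hog Rider", "Royal Hogs", "Battle Ram", "Ram Rider", "Balloon"].any
      (fun n => card_names.contains n) then "⚡ Schneller Angriff (Rush/Spam)"
  else "⚔️ Hybrid / Allrounder"

def is_beginner_friendly_deck (cards : List (List (String × String))) : Bool :=
  let card_names : PySem.Set String :=
    PySem.Set.ofList (cards.map (fun c => (PySem.Dict.mk c).getD "name" ""))
  let tricky_cards : PySem.Set String :=
    PySem.Set.ofList ["X-Bow", "Mortar", "Goblin Barrel", "Skeleton Barrel", "Miner", "Graveyard",
                      "Wall Breakers", "Goblin Drill", "Clone", "Mirror", "Freeze", "Tornado"]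
  if PySem.Set.inter card_names tricky_cards ≠ [] then false
  else
    let archetype := get_deck_archetype cards
    ["🛡️ Schwerer Angriff (Beatdown)", "⚡ Schneller Angriff (Rush/Spam)", "⚔️ Hybrid / Allrounder"].contains archetype

-- ===== PORT B =====
def is_beginner_friendly_deck_alt (cards : List (List (String × String))) : Bool :=
  let tricky_cards : PySem.Set String :=
    PySem.Set.ofList ["X-Bow", "Mortar", "Goblin Barrel", "Skeleton Barrel", "Miner", "Graveyard",
                      "Wall Breakers", "Goblin Drill", "Clone", "Mirror", "Freeze", "Tornado"]
  cards.all (fun c => !(PySem.Set.contains tricky_cards ((PySem.Dict.mk c).getD "name" "")))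

-- ===== PRECONDITION & SPEC =====
def Spec_is_beginner_friendly_deck (cards : List (List (String × String))) (out : Bool) : Prop := out = is_beginner_friendly_deck_alt cards
instance (cards : List (List (String × String))) (out : Bool) : Decidable (Spec_is_beginner_friendly_deck cards out) := by unfold Spec_is_beginner_friendly_deck; infer_instance

-- ===== CLAIM (what is proved, stated in full; the proofs are below) =====
def Claim_equal_is_beginner_friendly_deck : Prop := ∀ (cards : List (List (String × String))), Dom_is_beginner_friendly_deck cards → Spec_is_beginner_friendly_deck cards (is_beginner_friendly_deck cards)

-- ===== LEMMAS AND PROOFS =====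

theorem ab_eq (cards : List (List (String × String))) :
    is_beginner_friendly_deck cards = is_beginner_friendly_deck_alt cards := by
  simp only [is_beginner_friendly_deck, is_beginner_friendly_deck_alt, get_deck_archetype]
  set f : List (String × String) → String := fun c => (PySem.Dict.mk c).getD "name" "" with hf
  by_cases h : ∀ c ∈ cards, f c ∉ (["X-Bow", "Mortar", "Goblin Barrel", "Skeleton Barrel", "Miner",
      "Graveyard", "Wall Breakers", "Goblin Drill", "Clone", "Mirror", "Freeze", "Tornado"] : List String)
  · -- no tricky card: B is true, A's intersection is empty and the archetype is accepted
    have hB : cards.all (fun c => !(PySem.Set.contains (PySem.Set.ofList ["X-Bow", "Mortar",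
        "Goblin Barrel", "Skeleton Barrel", "Miner", "Graveyard", "Wall Breakers", "Goblin Drill",
        "Clone", "Mirror", "Freeze", "Tornado"]) (f c))) = true := by
      simp only [List.all_eq_true, Bool.not_eq_eq_eq_not, Bool.not_true,
        ← Bool.not_eq_true, PySem.Set.contains_iff, PySem.Set.mem_ofList]
      exact h
    have hinter : PySem.Set.inter
        (PySem.Set.ofList (cards.map f))
        (PySem.Set.ofList ["X-Bow", "Mortar", "Goblin Barrel", "Skeleton Barrel", "Miner",
          "Graveyard", "Wall Breakers", "Goblin Drill", "Clone", "Mirror", "Freeze", "Tornado"]) = [] := by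
      rw [List.eq_nil_iff_forall_not_mem]
      intro x hx
      rw [PySem.Set.mem_inter] at hx
      obtain ⟨hx1, hx2⟩ := hx
      rw [PySem.Set.mem_ofList, List.mem_map] at hx1
      obtain ⟨c, hc, rfl⟩ := hx1
      rw [PySem.Set.mem_ofList] at hx2
      exact h c hc hx2
    rw [hB, if_neg (by simpa using hinter)]
    -- the Siege and Bait conditions are false because their trigger cards are all tricky
    have hcond : ∀ (L : List String), (∀ n ∈ L, n ∈ (["X-Bow", "Mortar", "Goblin Barrel",
        "Skeleton Barrel", "Miner", "Graveyard", "Wall Breakers", "Goblin Drill", "Clone",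
        "Mirror", "Freeze", "Tornado"] : List String)) →
        L.any (fun n => (cards.map f).contains n) = false := by
      intro L hL
      rw [Bool.eq_false_iff]
      intro hx
      simp only [List.any_eq_true, List.contains_eq_mem, List.mem_map, decide_eq_true_eq] at hx
      obtain ⟨n, hn, c, hc, rfl⟩ := hx
      exact h c hc (hL _ hn)
    rw [hcond ["X-Bow", "Mortar"] (by decide),
        hcond ["Goblin Barrel", "Skeleton Barrel", "Miner", "Graveyard", "Wall Breakers", "Goblin Drill"] (by decide)]
    simp only [Bool.false_eq_true, if_false]
    split
    · rfl
    · split <;> rfl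
  · -- some tricky card: B is false and A's intersection is nonempty
    rw [not_forall] at h
    obtain ⟨c, hc2⟩ := h
    rw [not_forall] at hc2
    obtain ⟨hc, hmem⟩ := hc2
    rw [not_not] at hmem
    have hB : cards.all (fun c => !(PySem.Set.contains (PySem.Set.ofList ["X-Bow", "Mortar",
        "Goblin Barrel", "Skeleton Barrel", "Miner", "Graveyard", "Wall Breakers", "Goblin Drill",
        "Clone", "Mirror", "Freeze", "Tornado"]) (f c))) = false := by
      rw [Bool.eq_false_iff]
      intro hx
      rw [List.all_eq_true] at hx
      have h1 := hx c hc
      rw [Bool.not_eq_eq_eq_not, Bool.not_true] at h1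
      have h2 : (PySem.Set.ofList ["X-Bow", "Mortar", "Goblin Barrel", "Skeleton Barrel", "Miner",
          "Graveyard", "Wall Breakers", "Goblin Drill", "Clone", "Mirror", "Freeze",
          "Tornado"]).contains (f c) = true := by
        rw [PySem.Set.contains_iff, PySem.Set.mem_ofList]; exact hmem
      rw [h2] at h1
      exact absurd h1 (by decide)
    have hinter : f c ∈ PySem.Set.inter
        (PySem.Set.ofList (cards.map f))
        (PySem.Set.ofList ["X-Bow", "Mortar", "Goblin Barrel", "Skeleton Barrel", "Miner",
          "Graveyard", "Wall Breakers", "Goblin Drill", "Clone", "Mirror", "Freeze", "Tornado"]) := by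
      rw [PySem.Set.mem_inter, PySem.Set.mem_ofList, PySem.Set.mem_ofList]
      exact ⟨List.mem_map_of_mem hc, hmem⟩
    rw [hB, if_pos (by exact fun hnil => by simp [hnil] at hinter)]

-- ===== VERDICT (by name: the statement is the Claim_ definition above) =====
theorem is_beginner_friendly_deck_spec : Claim_equal_is_beginner_friendly_deck := by
  intro cards _
  exact ab_eq cards
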